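-- pv_equiv track=rewrite | github.com/SamuelVedrik/adventofcode2025 | day3.py | get_best_digit
-- ===== SOURCE A (Python) =====
-- def get_best_digit(batteries: list[int], must_leave=0):
--     candidates = range(9, 0, -1)
--     for candidate in candidates:
--         try:
--             first_index = batteries.index(candidate)
--             if first_index >= len(batteries) - must_leave:
--                 continue
--         except ValueError:
--             continue
--
--         return candidate, first_index
--     raise ValueError("couldn't find something")
-- ===== SOURCE B (Python) =====
-- def get_best_digit(batteries: list[int], must_leave=0):
--     # Single pass over the data: running maximum of digits 1..9 seen at an
--     # allowed index, remembering the index where the maximum first appeared.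
--     threshold = len(batteries) - must_leave
--     best, best_index = 0, -1
--     for i, b in enumerate(batteries):
--         if i < threshold and 1 <= b <= 9 and best < b:
--             best, best_index = b, i
--     if best == 0:
--         raise ValueError("couldn't find something")
--     return best, best_index
-- ===== Notes on version B (the rewrite author's own statement) =====
-- stated objective: alternative
-- what changed: A scans candidate digits 9..1, calling batteries.index for each; B never iterates over digits at all: it makes one pass over the list keeping a running maximum (digit, first index) over allowed positions.
import Mathlib
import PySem

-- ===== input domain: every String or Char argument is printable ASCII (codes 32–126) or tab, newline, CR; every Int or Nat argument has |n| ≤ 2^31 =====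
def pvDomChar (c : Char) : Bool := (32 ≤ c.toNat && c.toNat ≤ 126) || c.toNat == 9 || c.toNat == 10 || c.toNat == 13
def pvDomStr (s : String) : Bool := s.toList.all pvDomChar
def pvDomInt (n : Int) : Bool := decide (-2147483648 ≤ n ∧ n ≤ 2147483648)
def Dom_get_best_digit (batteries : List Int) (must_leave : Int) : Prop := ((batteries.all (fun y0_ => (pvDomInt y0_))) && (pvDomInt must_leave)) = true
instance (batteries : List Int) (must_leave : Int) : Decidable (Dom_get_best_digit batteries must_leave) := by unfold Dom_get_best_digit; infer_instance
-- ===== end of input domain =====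

-- B replaces A's scan over candidate digits 9..1 (one batteries.index per digit) by a single
-- pass over the list keeping a running maximum (digit, first index) over allowed positions.

-- ===== PORT A =====
-- A's for-loop over range(9, 0, -1): try batteries.index(candidate); continue on ValueError
-- or when first_index >= len - must_leave; else return (candidate, first_index).
def getBestLoopA (batteries : List Int) (must_leave : Int) : List Int → Option (Int × Int)
  | [] => none
  | c :: rest =>
    match PySem.List.index? batteries c with
    | none => getBestLoopA batteries must_leave rest
    | some fi =>
      if (batteries.length : Int) - must_leave ≤ (fi : Int) then
        getBestLoopA batteries must_leave rest
      else
        some (c, (fi : Int))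

def get_best_digit (batteries : List Int) (must_leave : Int) : Int × Int :=
  -- Python raises ValueError when the loop exhausts; Pre_ excludes that case (default junk here).
  (getBestLoopA batteries must_leave (PySem.List.pyRange 9 0 (-1))).getD (0, 0)

-- ===== PORT B =====
-- body of Source B's single for-loop over enumerate(batteries)
def bestStep (threshold : Int) (s : Int × Int) (p : Int × Int) : Int × Int :=
  if p.1 < threshold ∧ 1 ≤ p.2 ∧ p.2 ≤ 9 ∧ s.1 < p.2 then (p.2, p.1) else s

def get_best_digit_alt (batteries : List Int) (must_leave : Int) : Int × Int :=
  let threshold := (batteries.length : Int) - must_leave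
  let s := (PySem.List.enumerate batteries).foldl (bestStep threshold) (0, -1)
  -- Python raises ValueError when best == 0; Pre_ excludes that case (default junk here).
  if s.1 = 0 then (0, 0) else s

-- ===== PRECONDITION & SPEC =====
-- Pre_ excludes exactly the inputs on which both programs raise ValueError
-- (no digit 1..9 has a first occurrence strictly before len(batteries) - must_leave).
def Pre_get_best_digit (batteries : List Int) (must_leave : Int) : Prop :=
  (([1, 2, 3, 4, 5, 6, 7, 8, 9] : List Int).any (fun c =>
    match PySem.List.index? batteries c with
    | some k => decide ((k : Int) < (batteries.length : Int) - must_leave)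
    | none => false)) = true
instance (batteries : List Int) (must_leave : Int) : Decidable (Pre_get_best_digit batteries must_leave) := by unfold Pre_get_best_digit; infer_instance

def pvWitness_get_best_digit : List Int × Int := ([3, 7], 0)

def Spec_get_best_digit (batteries : List Int) (must_leave : Int) (out : Int × Int) : Prop := out = get_best_digit_alt batteries must_leave
instance (batteries : List Int) (must_leave : Int) (out : Int × Int) : Decidable (Spec_get_best_digit batteries must_leave out) := by unfold Spec_get_best_digit; infer_instance

-- ===== CLAIM =====
def Claim_equal_get_best_digit : Prop := ∀ (batteries : List Int) (must_leave : Int), Dom_get_best_digit batteries must_leave → Pre_get_best_digit batteries must_leave → Spec_get_best_digit batteries must_leave (get_best_digit batteries must_leave)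

-- ===== LEMMAS AND PROOFS =====

-- "digit d is of no use": its first occurrence (if any) is not strictly before the threshold
def FailA (batteries : List Int) (must_leave : Int) (d : Int) : Prop :=
  ∀ m : Nat, PySem.List.index? batteries d = some m → (batteries.length : Int) - must_leave ≤ (m : Int)

theorem pyRange_desc : PySem.List.pyRange 9 0 (-1) = [9, 8, 7, 6, 5, 4, 3, 2, 1] := by decide

-- If A's candidate loop returns none, every candidate in the list fails.
theorem A_loop_none (batteries : List Int) (must_leave : Int) (l : List Int)
    (h : getBestLoopA batteries must_leave l = none) :
    ∀ c ∈ l, FailA batteries must_leave c := by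
  induction l with
  | nil => intro c hc; cases hc
  | cons x rest ih =>
    intro c hc
    unfold getBestLoopA at h
    rcases List.mem_cons.mp hc with hcx | hcr
    · subst hcx
      intro m hm
      rw [hm] at h; dsimp only at h
      by_cases hle : (batteries.length : Int) - must_leave ≤ (m : Int)
      · exact hle
      · rw [if_neg hle] at h; cases h
    · cases hi : PySem.List.index? batteries x with
      | none => rw [hi] at h; exact ih h c hcr
      | some fi =>
        rw [hi] at h; dsimp only at h
        by_cases hle : (batteries.length : Int) - must_leave ≤ (fi : Int)
        · rw [if_pos hle] at h; exact ih h c hcr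
        · rw [if_neg hle] at h; cases h

-- If A's loop (on a strictly descending candidate list) returns some (c, k), then
-- c's first occurrence is k.toNat, it is before the threshold, and every larger candidate fails.
theorem A_loop_some (batteries : List Int) (must_leave : Int) (l : List Int)
    (hdesc : l.Pairwise (· > ·)) (c k : Int)
    (h : getBestLoopA batteries must_leave l = some (c, k)) :
    c ∈ l ∧ ∃ k0 : Nat, PySem.List.index? batteries c = some k0 ∧ k = (k0 : Int) ∧
      (k0 : Int) < (batteries.length : Int) - must_leave ∧
      ∀ d ∈ l, c < d → FailA batteries must_leave d := by
  induction l with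
  | nil => cases h
  | cons x rest ih =>
    rw [List.pairwise_cons] at hdesc
    unfold getBestLoopA at h
    cases hi : PySem.List.index? batteries x with
    | none =>
      rw [hi] at h
      obtain ⟨hmem, k0, h1, h2, h3, h4⟩ := ih hdesc.2 h
      refine ⟨List.mem_cons_of_mem _ hmem, k0, h1, h2, h3, ?_⟩
      intro d hd hcd
      rcases List.mem_cons.mp hd with rfl | hdr
      · intro m hm; rw [hi] at hm; cases hm
      · exact h4 d hdr hcd
    | some fi =>
      rw [hi] at h; dsimp only at h
      by_cases hle : (batteries.length : Int) - must_leave ≤ (fi : Int)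
      · rw [if_pos hle] at h
        obtain ⟨hmem, k0, h1, h2, h3, h4⟩ := ih hdesc.2 h
        refine ⟨List.mem_cons_of_mem _ hmem, k0, h1, h2, h3, ?_⟩
        intro d hd hcd
        rcases List.mem_cons.mp hd with rfl | hdr
        · intro m hm; rw [hi] at hm; cases hm; exact hle
        · exact h4 d hdr hcd
      · rw [if_neg hle] at h
        injection h with h'
        injection h' with hc hk
        subst hc; subst hk
        refine ⟨List.mem_cons_self .., fi, hi, rfl, by omega, ?_⟩
        intro d hd hcd
        rcases List.mem_cons.mp hd with rfl | hdr
        · omega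
        · exact absurd (hdesc.1 d hdr) (by omega)

-- If no position in the (offset) suffix can beat the current best, the fold is the identity.
theorem fold_no_update (T : Int) (xs : List Int) (n B I : Int)
    (h : ∀ p ∈ PySem.List.enumerate xs n, p.1 < T → 1 ≤ p.2 → p.2 ≤ 9 → p.2 ≤ B) :
    (PySem.List.enumerate xs n).foldl (bestStep T) (B, I) = (B, I) := by
  induction xs generalizing n with
  | nil => simp [PySem.List.enumerate_nil]
  | cons x xs ih =>
    rw [PySem.List.enumerate_cons, List.foldl_cons]
    have hx := h (n, x) (List.mem_cons_self ..)
    have hstep : bestStep T (B, I) (n, x) = (B, I) := by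
      unfold bestStep
      rw [if_neg]
      rintro ⟨h1, h2, h3, h4⟩
      exact absurd (hx h1 h2 h3) (by omega)
    rw [hstep]
    exact ih (n + 1) (fun p hp => h p (List.mem_cons_of_mem _ hp))

-- If c (1..9) first occurs in the suffix xs at relative index j, n + j is before the threshold,
-- no allowed position in the suffix holds a digit above c, and the current best B is below c,
-- then the fold ends at (c, n + j).
theorem fold_reaches (T : Int) (c : Int) (hc1 : 1 ≤ c) (hc9 : c ≤ 9)
    (xs : List Int) (n : Int) (B I : Int) (hB : B < c)
    (hmax : ∀ p ∈ PySem.List.enumerate xs n, p.1 < T → 1 ≤ p.2 → p.2 ≤ 9 → p.2 ≤ c)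
    (j : Nat) (hj : PySem.List.index? xs c = some j)
    (hjT : n + (j : Int) < T) :
    (PySem.List.enumerate xs n).foldl (bestStep T) (B, I) = (c, n + (j : Int)) := by
  induction xs generalizing n B I j with
  | nil => simp [PySem.List.index?] at hj
  | cons x xs ih =>
    rw [PySem.List.enumerate_cons, List.foldl_cons]
    by_cases hxc : x = c
    · subst hxc
      rw [PySem.List.index?_cons_self] at hj
      injection hj with hj; subst hj
      have hstep : bestStep T (B, I) (n, x) = (x, n) := by
        unfold bestStep
        rw [if_pos ⟨by simpa using hjT, hc1, hc9, hB⟩]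
      rw [hstep]
      have := fold_no_update T xs (n + 1) x n
        (fun p hp => hmax p (List.mem_cons_of_mem _ hp))
      simpa using this
    · rw [PySem.List.index?_cons_of_ne (h := hxc)] at hj
      cases hj' : PySem.List.index? xs c with
      | none => rw [hj'] at hj; cases hj
      | some j' =>
        rw [hj'] at hj
        injection hj with hj; subst hj
        have htail : ∀ p ∈ PySem.List.enumerate xs (n + 1), p.1 < T → 1 ≤ p.2 → p.2 ≤ 9 → p.2 ≤ c :=
          fun p hp => hmax p (List.mem_cons_of_mem _ hp)
        have hjT' : (n + 1) + (j' : Int) < T := by push_cast at hjT ⊢; omega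
        by_cases hupd : n < T ∧ 1 ≤ x ∧ x ≤ 9 ∧ B < x
        · have hxltc : x < c := by
            have := hmax (n, x) (List.mem_cons_self ..) hupd.1 hupd.2.1 hupd.2.2.1
            rcases lt_or_eq_of_le this with h | h
            · exact h
            · exact absurd h hxc
          have hstep : bestStep T (B, I) (n, x) = (x, n) := by
            unfold bestStep; rw [if_pos hupd]
          rw [hstep, ih (n + 1) x n hxltc htail j' hj' hjT']
          push_cast; ring_nf
        · have hstep : bestStep T (B, I) (n, x) = (B, I) := by
            unfold bestStep; rw [if_neg hupd]
          rw [hstep, ih (n + 1) B I hB htail j' hj' hjT']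
          push_cast; ring_nf

-- A member of the list has a first occurrence at or before its own position.
theorem index?_le_of_getElem (xs : List Int) (i : Nat) (v : Int) (h : xs[i]? = some v) :
    ∃ m : Nat, PySem.List.index? xs v = some m ∧ m ≤ i := by
  induction xs generalizing i with
  | nil => simp at h
  | cons x xs ih =>
    by_cases hxv : x = v
    · subst hxv
      exact ⟨0, PySem.List.index?_cons_self .., Nat.zero_le _⟩
    · cases i with
      | zero => simp at h; exact absurd h hxv
      | succ i =>
        simp only [List.getElem?_cons_succ] at h
        obtain ⟨m, hm, hmi⟩ := ih i h
        refine ⟨m + 1, ?_, by omega⟩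
        rw [PySem.List.index?_cons_of_ne (h := hxv), hm]
        rfl

-- Every larger digit failing means no allowed position holds a digit above c.
theorem hmax_of_fail (batteries : List Int) (must_leave : Int) (c : Int)
    (hfail : ∀ d ∈ PySem.List.pyRange 9 0 (-1), c < d → FailA batteries must_leave d) :
    ∀ p ∈ PySem.List.enumerate batteries 0,
      p.1 < (batteries.length : Int) - must_leave → 1 ≤ p.2 → p.2 ≤ 9 → p.2 ≤ c := by
  intro p hp hpT hp1 hp9
  by_contra hgt
  rw [not_le] at hgt
  have hdmem : p.2 ∈ PySem.List.pyRange 9 0 (-1) := by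
    rw [PySem.List.mem_pyRange_neg_one]
    omega
  obtain ⟨k, hk, hpk⟩ := (PySem.List.mem_enumerate_iff _ _ _).mp hp
  have hget : batteries[k]? = some p.2 := by
    rw [List.getElem?_eq_getElem hk]
    rw [hpk]
  obtain ⟨m, hm, hmk⟩ := index?_le_of_getElem batteries k p.2 hget
  have := hfail p.2 hdmem hgt m hm
  have hp1k : p.1 = (k : Int) := by rw [hpk]; simp
  omega

-- ===== VERDICT =====
theorem get_best_digit_spec : Claim_equal_get_best_digit := by
  intro batteries must_leave _ hpre
  unfold Spec_get_best_digit get_best_digit get_best_digit_alt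
  cases hA : getBestLoopA batteries must_leave (PySem.List.pyRange 9 0 (-1)) with
  | none =>
    exfalso
    unfold Pre_get_best_digit at hpre
    rw [List.any_eq_true] at hpre
    obtain ⟨c, hcmem, hc⟩ := hpre
    cases hi : PySem.List.index? batteries c with
    | none => rw [hi] at hc; cases hc
    | some k =>
      rw [hi] at hc
      have hk : (k : Int) < (batteries.length : Int) - must_leave := by simpa using hc
      have hc19 : 1 ≤ c ∧ c ≤ 9 := by
        fin_cases hcmem <;> simp
      have hcdesc : c ∈ PySem.List.pyRange 9 0 (-1) := by
        rw [PySem.List.mem_pyRange_neg_one]; omega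
      exact absurd (A_loop_none batteries must_leave _ hA c hcdesc k hi) (by omega)
  | some p =>
    obtain ⟨c, k⟩ := p
    have hdesc : (PySem.List.pyRange 9 0 (-1)).Pairwise (· > ·) := by
      rw [pyRange_desc]; decide
    obtain ⟨hmem, k0, h1, h2, h3, h4⟩ := A_loop_some batteries must_leave _ hdesc c k hA
    have hc19 : 1 ≤ c ∧ c ≤ 9 := by
      rw [PySem.List.mem_pyRange_neg_one] at hmem; omega
    have hmax := hmax_of_fail batteries must_leave c h4
    have hfold := fold_reaches ((batteries.length : Int) - must_leave) c hc19.1 hc19.2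
      batteries 0 0 (-1) (by omega) hmax k0 h1 (by omega)
    simp only [hfold]
    rw [if_neg (by omega)]
    simp [h2]
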